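-- pv_equiv track=rewrite | github.com/flyhighplato/MS-GSP | MS-GSP/src/main/Sequence.py | rawSeqContains
-- ===== SOURCE A (Python) =====
-- def rawSeqContains( rawSeqSup, rawSeqSub ):
--     if ( len( rawSeqSub ) == 0 ):
--         return True
--     idxSub = 0
--     for idxSup in range( 0, len( rawSeqSup ) ):
--         if ( set( rawSeqSub[ idxSub ] ).issubset( set( rawSeqSup[ idxSup ] ) ) ):
--             idxSub += 1
--             if ( idxSub == len( rawSeqSub ) ):
--                 return True
--     return False
-- ===== SOURCE B (Python) =====
-- def rawSeqContains(rawSeqSup, rawSeqSub):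
--     remaining = rawSeqSub
--     for sup in rawSeqSup:
--         if not remaining:
--             break
--         if all(x in sup for x in remaining[0]):
--             remaining = remaining[1:]
--     return not remaining
-- ===== Notes on version B (the rewrite author's own statement) =====
-- stated objective: simpler
-- what changed: Replaces the index-counter loop with early returns by a single pass that consumes a 'remaining' list of still-unmatched sub-elements (plain membership tests instead of building sets) and reports whether it is empty at the end.
import Mathlib
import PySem

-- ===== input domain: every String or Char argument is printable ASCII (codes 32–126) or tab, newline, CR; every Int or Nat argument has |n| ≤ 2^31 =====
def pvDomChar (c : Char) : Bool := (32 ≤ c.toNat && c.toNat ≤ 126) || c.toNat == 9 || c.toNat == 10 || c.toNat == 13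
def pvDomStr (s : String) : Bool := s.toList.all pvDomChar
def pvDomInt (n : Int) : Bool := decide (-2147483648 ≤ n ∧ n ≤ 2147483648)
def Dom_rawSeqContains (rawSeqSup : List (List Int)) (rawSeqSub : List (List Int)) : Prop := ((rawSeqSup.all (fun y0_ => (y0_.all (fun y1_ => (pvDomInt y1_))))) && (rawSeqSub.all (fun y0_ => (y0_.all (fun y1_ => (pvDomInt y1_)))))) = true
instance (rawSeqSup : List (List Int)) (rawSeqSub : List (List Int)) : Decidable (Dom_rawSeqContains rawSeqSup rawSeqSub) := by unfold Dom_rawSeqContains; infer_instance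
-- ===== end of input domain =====

-- B replaces A's index-counter loop (with early returns) by a single pass that consumes a
-- 'remaining' list of still-unmatched sub-elements; same cost, simpler decomposition.

-- ===== PORT A =====
-- the indexed for-loop of A, with its early returns, as recursion on idxSup;
-- rawSeqSub[idxSub] is taken with getD: the loop maintains idxSub < len(rawSeqSub), so it never raises
def rawSeqContainsLoop (rawSeqSup rawSeqSub : List (List Int)) (idxSup idxSub : Nat) : Bool :=
  if h : idxSup < rawSeqSup.length then
    if PySem.Set.issubset (PySem.Set.ofList (rawSeqSub.getD idxSub []))
        (PySem.Set.ofList (rawSeqSup[idxSup])) then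
      if idxSub + 1 == rawSeqSub.length then true
      else rawSeqContainsLoop rawSeqSup rawSeqSub (idxSup + 1) (idxSub + 1)
    else rawSeqContainsLoop rawSeqSup rawSeqSub (idxSup + 1) idxSub
  else false
termination_by rawSeqSup.length - idxSup
decreasing_by all_goals omega

def rawSeqContains (rawSeqSup : List (List Int)) (rawSeqSub : List (List Int)) : Bool :=
  if rawSeqSub.length == 0 then true
  else rawSeqContainsLoop rawSeqSup rawSeqSub 0 0

-- ===== PORT B =====
-- the for-loop of Source B: walk rawSeqSup once, consuming 'remaining' (break when it is empty)
def rawSeqContainsGo : List (List Int) → List (List Int) → List (List Int)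
  | _, [] => []
  | [], remaining => remaining
  | s :: rest, r :: rs =>
    if r.all (fun x => s.contains x) then rawSeqContainsGo rest rs
    else rawSeqContainsGo rest (r :: rs)

def rawSeqContains_alt (rawSeqSup : List (List Int)) (rawSeqSub : List (List Int)) : Bool :=
  (rawSeqContainsGo rawSeqSup rawSeqSub).isEmpty

-- ===== PRECONDITION & SPEC =====
def Spec_rawSeqContains (rawSeqSup : List (List Int)) (rawSeqSub : List (List Int)) (out : Bool) : Prop := out = rawSeqContains_alt rawSeqSup rawSeqSub
instance (rawSeqSup : List (List Int)) (rawSeqSub : List (List Int)) (out : Bool) : Decidable (Spec_rawSeqContains rawSeqSup rawSeqSub out) := by unfold Spec_rawSeqContains; infer_instance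

-- ===== CLAIM (what is proved, stated in full; the proofs are below) =====
def Claim_equal_rawSeqContains : Prop := ∀ (rawSeqSup : List (List Int)) (rawSeqSub : List (List Int)), Dom_rawSeqContains rawSeqSup rawSeqSub → Spec_rawSeqContains rawSeqSup rawSeqSub (rawSeqContains rawSeqSup rawSeqSub)

-- ===== LEMMAS AND PROOFS =====

-- set(a).issubset(set(b)) coincides with the element-wise membership test B uses
lemma issubset_eq_all (a b : List Int) :
    PySem.Set.issubset (PySem.Set.ofList a) (PySem.Set.ofList b)
      = a.all (fun x => b.contains x) := by
  rw [Bool.eq_iff_iff]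
  simp [PySem.Set.issubset_iff, List.all_eq_true]

lemma loop_eq_go (rawSeqSub : List (List Int)) :
    ∀ (n : Nat) (rawSeqSup : List (List Int)) (idxSup idxSub : Nat),
      rawSeqSup.length - idxSup = n → idxSub < rawSeqSub.length →
      rawSeqContainsLoop rawSeqSup rawSeqSub idxSup idxSub
        = (rawSeqContainsGo (rawSeqSup.drop idxSup) (rawSeqSub.drop idxSub)).isEmpty := by
  intro n
  induction n with
  | zero =>
    intro sup idxSup idxSub hn hlt
    have hge : sup.length ≤ idxSup := by omega
    rw [rawSeqContainsLoop]
    rw [dif_neg (by omega)]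
    rw [List.drop_eq_nil_of_le hge]
    obtain ⟨r, rs, hr⟩ : ∃ r rs, rawSeqSub.drop idxSub = r :: rs := by
      rcases h : rawSeqSub.drop idxSub with _ | ⟨r, rs⟩
      · have := List.drop_eq_nil_iff.mp h; omega
      · exact ⟨r, rs, rfl⟩
    rw [hr]; rfl
  | succ n ih =>
    intro sup idxSup idxSub hn hlt
    have hsup : idxSup < sup.length := by omega
    rw [rawSeqContainsLoop, dif_pos hsup]
    rw [List.drop_eq_getElem_cons hsup, List.drop_eq_getElem_cons hlt]
    rw [List.getD_eq_getElem rawSeqSub [] hlt, issubset_eq_all]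
    by_cases hss : (rawSeqSub[idxSub]).all (fun x => (sup[idxSup]).contains x)
    · rw [if_pos hss]
      rw [rawSeqContainsGo, if_pos hss]
      by_cases hend : idxSub + 1 = rawSeqSub.length
      · rw [if_pos (by simpa using hend)]
        rw [show List.drop (idxSub + 1) rawSeqSub = ([] : List (List Int)) from
          List.drop_eq_nil_of_le (by omega)]
        cases sup.drop (idxSup + 1) <;> rfl
      · rw [if_neg (by simpa using hend)]
        exact ih sup (idxSup + 1) (idxSub + 1) (by omega) (by omega)
    · rw [if_neg hss]
      rw [rawSeqContainsGo, if_neg hss]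
      rw [← List.drop_eq_getElem_cons hlt]
      exact ih sup (idxSup + 1) idxSub (by omega) hlt

-- ===== VERDICT (by name: the statement is the Claim_ definition above) =====
theorem rawSeqContains_spec : Claim_equal_rawSeqContains := by
  intro rawSeqSup rawSeqSub _
  unfold Spec_rawSeqContains rawSeqContains rawSeqContains_alt
  cases hsub : rawSeqSub with
  | nil => simp [rawSeqContainsGo.eq_def]
  | cons r rs =>
    rw [if_neg (by simp)]
    rw [loop_eq_go (r :: rs) rawSeqSup.length rawSeqSup 0 0 (by omega) (by simp)]
    simp
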